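-- pv_equiv track=rewrite | github.com/lorenzovarese/delta-debugging-implementation | delta_debugging.py | split_into_parts
-- ===== SOURCE A (Python) =====
-- from typing import List
--
-- def split_into_parts(content: str, n: int) -> List[str]:
--     """
--     Splits the content into n parts as evenly as possible.
--
--     Args:
--         content (str): The content to split.
--         n (int): The number of parts to split the content into.
--
--     Returns:
--         List[str]: A list of n parts of the original content.
--     """
--     parts = []
--     part_size = len(content) // n
--     remainder = len(content) % n
--     start = 0
--
--     for i in range(n):
--         end = start + part_size + (1 if i < remainder else 0)  # Distribute the remainder evenly
--         parts.append(content[start:end])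
--         start = end
--
--     return parts
-- ===== SOURCE B (Python) =====
-- def split_into_parts(content, n):
--     parts = []
--     while n > 0:
--         cut = len(content) // n + (1 if len(content) % n else 0)
--         parts.append(content[:cut])
--         content = content[cut:]
--         n -= 1
--     return parts
-- ===== Notes on version B (the rewrite author's own statement) =====
-- stated objective: alternative
-- what changed: Replaces A's precomputed quotient/remainder with a running start index by a peeling loop that each iteration recomputes the ceil-sized chunk ceil(len(rest)/k) for the k parts still to make, slices it off the front and continues on the suffix (correct because removing one ceil-sized chunk removes exactly one unit of the remainder).
import Mathlib
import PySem

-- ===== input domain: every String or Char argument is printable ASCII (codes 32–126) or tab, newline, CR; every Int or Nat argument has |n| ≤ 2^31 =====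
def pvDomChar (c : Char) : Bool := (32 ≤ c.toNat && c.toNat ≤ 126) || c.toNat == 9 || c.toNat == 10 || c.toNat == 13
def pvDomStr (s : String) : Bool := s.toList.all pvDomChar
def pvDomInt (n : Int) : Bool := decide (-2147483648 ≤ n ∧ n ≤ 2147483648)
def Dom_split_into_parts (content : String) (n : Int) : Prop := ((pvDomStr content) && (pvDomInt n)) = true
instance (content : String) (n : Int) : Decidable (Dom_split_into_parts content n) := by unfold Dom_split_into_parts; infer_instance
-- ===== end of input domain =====

-- B replaces A's precomputed-quotient running-start loop by a peeling loop: each step recomputes and slices off one ceil-sized chunk of the remaining suffix (alternative decomposition).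


-- ===== PORT A =====
def split_into_parts (content : String) (n : Int) : List String :=
  let part_size := PySem.Int.floordiv (PySem.Str.len content) n
  let remainder := PySem.Int.mod (PySem.Str.len content) n
  let final := (PySem.List.pyRange 0 n).foldl
    (fun (st : List String × Int) i =>
      let e := st.2 + part_size + (if i < remainder then 1 else 0)
      (st.1 ++ [PySem.Str.slice content (some st.2) (some e)], e))
    (([] : List String), 0)
  final.1

-- ===== PORT B =====
-- the while loop of Source B: peel one ceil-sized chunk per iteration
def splitPartsLoop (parts : List String) (content : String) (n : Int) : List String :=
  if n ≤ 0 then parts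
  else
    let cut := PySem.Int.floordiv (PySem.Str.len content) n
      + (if PySem.Int.mod (PySem.Str.len content) n ≠ 0 then 1 else 0)
    splitPartsLoop (parts ++ [PySem.Str.slice content none (some cut)])
      (PySem.Str.slice content (some cut) none) (n - 1)
termination_by n.toNat
decreasing_by
  rename_i h
  omega

def split_into_parts_alt (content : String) (n : Int) : List String :=
  splitPartsLoop [] content n

-- ===== PRECONDITION & SPEC =====
-- Pre_ excludes exactly n = 0, where Python's '//' raises ZeroDivisionError.
def Pre_split_into_parts (content : String) (n : Int) : Prop := n ≠ 0
instance (content : String) (n : Int) : Decidable (Pre_split_into_parts content n) := by unfold Pre_split_into_parts; infer_instance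
def pvWitness_split_into_parts : String × Int := ("abcdefg", 3)

def Spec_split_into_parts (content : String) (n : Int) (out : List String) : Prop := out = split_into_parts_alt content n
instance (content : String) (n : Int) (out : List String) : Decidable (Spec_split_into_parts content n out) := by unfold Spec_split_into_parts; infer_instance

-- ===== CLAIM (what is proved, stated in full; the proofs are below) =====
def Claim_equal_split_into_parts : Prop := ∀ (content : String) (n : Int), Dom_split_into_parts content n → Pre_split_into_parts content n → Spec_split_into_parts content n (split_into_parts content n)

-- ===== LEMMAS AND PROOFS =====

-- A's foldl from start = i*q + min i r produces exactly the closed-form slices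
lemma loop_closed_form (content : String) (q r : Int) :
    ∀ (m : Nat) (i n : Int), (n - i).toNat = m → ∀ (acc : List String),
    ((PySem.List.pyRange i n).foldl
      (fun (st : List String × Int) j =>
        let e := st.2 + q + (if j < r then 1 else 0)
        (st.1 ++ [PySem.Str.slice content (some st.2) (some e)], e))
      (acc, i * q + min i r)).1
    = acc ++ (PySem.List.pyRange i n).map (fun j =>
        PySem.Str.slice content (some (j * q + min j r)) (some ((j + 1) * q + min (j + 1) r))) := by
  intro m
  induction m with
  | zero =>
      intro i n h acc
      rw [PySem.List.pyRange_one_eq_nil (by omega)]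
      simp
  | succ k ih =>
      intro i n h acc
      have hlt : i < n := by omega
      rw [PySem.List.pyRange_one_cons hlt]
      simp only [List.foldl_cons, List.map_cons]
      have he : i * q + min i r + q + (if i < r then 1 else 0)
          = (i + 1) * q + min (i + 1) r := by
        have hmin : min (i + 1) r = min i r + (if i < r then 1 else 0) := by
          split_ifs <;> omega
        rw [hmin]; ring
      simp only [he]
      rw [ih (i + 1) n (by omega) (acc ++ [PySem.Str.slice content (some (i * q + min i r)) (some ((i + 1) * q + min (i + 1) r))])]
      simp

-- shift a slice of a suffix back to a slice of the whole string
lemma slice_shift (content : String) (cut a b : Int)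
    (hc : 0 ≤ cut) (ha : 0 ≤ a) (hb : 0 ≤ b) :
    PySem.Str.slice (PySem.Str.slice content (some cut) none) (some a) (some b)
      = PySem.Str.slice content (some (cut + a)) (some (cut + b)) := by
  apply String.toList_injective
  rw [PySem.Str.toList_slice, PySem.Str.toList_slice, PySem.Str.toList_slice]
  simp only [PySem.Chars.slice_eq_listSlice]
  rw [PySem.List.slice_from _ hc,
      PySem.List.slice_toNat _ ha hb,
      PySem.List.slice_toNat _ (by omega : (0:Int) ≤ cut + a) (by omega : (0:Int) ≤ cut + b)]
  rw [List.drop_drop]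
  congr 1
  · omega
  · congr 1; omega

-- a slice starting at 0 is a slice from the beginning
lemma str_slice_zero (content : String) (b : Option Int) :
    PySem.Str.slice content (some 0) b = PySem.Str.slice content none b := by
  apply String.toList_injective
  rw [PySem.Str.toList_slice, PySem.Str.toList_slice]
  simp [PySem.Chars.slice_eq_listSlice]

-- B's recursion produces the same closed-form slices
lemma alt_closed_form :
    ∀ (m : Nat) (parts : List String) (content : String) (n : Int), n.toNat = m →
    splitPartsLoop parts content n
      = parts ++ (PySem.List.pyRange 0 n).map (fun j =>
          PySem.Str.slice content
            (some (j * PySem.Int.floordiv (PySem.Str.len content) n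
                    + min j (PySem.Int.mod (PySem.Str.len content) n)))
            (some ((j + 1) * PySem.Int.floordiv (PySem.Str.len content) n
                    + min (j + 1) (PySem.Int.mod (PySem.Str.len content) n)))) := by
  intro m
  induction m with
  | zero =>
      intro parts content n h
      rw [splitPartsLoop, PySem.List.pyRange_one_eq_nil (by omega)]
      simp [show n ≤ 0 by omega]
  | succ k ih =>
      intro parts content n h
      have hn : 0 < n := by omega
      set L := PySem.Str.len content with hLdef
      have hL0 : 0 ≤ L := by
        rw [hLdef, PySem.Str.len_eq]; positivity
      set q := PySem.Int.floordiv L n with hq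
      set r := PySem.Int.mod L n with hr
      have hfd : q = L / n := by rw [hq, PySem.Int.floordiv_eq_ediv_of_pos hn]
      have hmd : r = L % n := by rw [hr, PySem.Int.mod_eq_emod_of_pos hn]
      have hr0 : 0 ≤ r := by rw [hmd]; exact Int.emod_nonneg _ (by omega)
      have hrn : r < n := by rw [hmd]; exact Int.emod_lt_of_pos _ hn
      have hqr : n * q + r = L := by rw [hfd, hmd]; exact (Int.ediv_add_emod L n)
      have hq0 : 0 ≤ q := by
        rw [hfd]; exact Int.ediv_nonneg hL0 (by omega)
      have hcut : q + (if r ≠ 0 then (1:Int) else 0) = q + min 1 r := by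
        split_ifs <;> omega
      rw [splitPartsLoop]
      simp only [if_neg (by omega : ¬ n ≤ 0), ← hLdef, ← hq, ← hr, hcut]
      -- the suffix
      set rest := PySem.Str.slice content (some (q + min 1 r)) none with hrest
      have hcut0 : 0 ≤ q + min 1 r := by omega
      have hcutL : q + min 1 r ≤ L := by nlinarith [min_le_right (1:Int) r]
      have hlenrest : PySem.Str.len rest = L - (q + min 1 r) := by
        rw [hrest, PySem.Str.len_eq, PySem.Str.toList_slice]
        simp only [PySem.Chars.slice_eq_listSlice]
        rw [PySem.List.slice_from _ hcut0, List.length_drop]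
        rw [hLdef, PySem.Str.len_eq] at hcutL hL0 ⊢
        omega
      rw [ih (parts ++ [PySem.Str.slice content none (some (q + min 1 r))]) rest (n - 1) (by omega),
          List.append_assoc]
      congr 1
      by_cases h1 : n = 1
      · subst h1
        rw [PySem.List.pyRange_one_eq_nil (by omega : (1:Int) - 1 ≤ 0),
            PySem.List.pyRange_one_cons (by omega : (0:Int) < 1),
            PySem.List.pyRange_one_eq_nil (by omega : (1:Int) ≤ 0 + 1)]
        simp only [List.map_cons, List.map_nil, List.append_nil]
        have hrz : r = 0 := by omega
        rw [← str_slice_zero]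
        norm_num [hrz]
      · -- n ≥ 2 : the suffix's quotient/remainder
        have hn2 : 2 ≤ n := by omega
        have hq2 : PySem.Int.floordiv (PySem.Str.len rest) (n - 1) = q := by
          rw [hlenrest, PySem.Int.floordiv_eq_iff_of_pos (by omega : (0:Int) < n - 1)]
          have h2 : q * (n - 1) = n * q - q := by ring
          have h3 : (q + 1) * (n - 1) = n * q - q + n - 1 := by ring
          have k1 : 0 ≤ r - min 1 r := by omega
          have k2 : r - min 1 r < n - 1 := by omega
          exact ⟨by linarith, by linarith⟩
        have hr2 : PySem.Int.mod (PySem.Str.len rest) (n - 1) = r - min 1 r := by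
          have hid := PySem.Int.floordiv_mul_add_mod (PySem.Str.len rest) (n - 1)
          rw [hq2] at hid
          rw [hlenrest] at hid ⊢
          have h2 : q * (n - 1) = n * q - q := by ring
          linarith [hid, h2]
        rw [hq2, hr2]
        rw [PySem.List.pyRange_one_cons (by omega : (0:Int) < n)]
        simp only [List.map_cons, List.singleton_append]
        rw [List.cons.injEq]
        constructor
        · -- heads agree
          rw [← str_slice_zero]
          have : min (0:Int) r = 0 := by omega
          norm_num [this]
        · -- tails agree: shift suffix slices back to content
          rw [show (0:Int) + 1 = 1 from rfl, PySem.List.pyRange_one 1 n,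
              PySem.List.pyRange_one 0 (n - 1)]
          rw [List.map_map, List.map_map]
          norm_num
          intro j hj
          have hj0 : (0:Int) ≤ (j:Int) := by positivity
          have hmin : ∀ t : Int, 0 ≤ t → min 1 r + min t (r - min 1 r) = min (1 + t) r := by
            intro t ht; omega
          have ha : (0:Int) ≤ (j:Int) * q + min (j:Int) (r - min 1 r) := by
            have := mul_nonneg hj0 hq0; omega
          have hb : (0:Int) ≤ ((j:Int) + 1) * q + min ((j:Int) + 1) (r - min 1 r) := by
            have := mul_nonneg (by omega : (0:Int) ≤ (j:Int) + 1) hq0; omega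
          rw [slice_shift content _ _ _ hcut0 ha hb]
          have e1 : (q + min 1 r) + ((j:Int) * q + min (j:Int) (r - min 1 r))
              = (1 + (j:Int)) * q + min (1 + (j:Int)) r := by
            have h2 : (1 + (j:Int)) * q = q + (j:Int) * q := by ring
            linarith [hmin (j:Int) hj0, h2]
          have e2 : (q + min 1 r) + (((j:Int) + 1) * q + min ((j:Int) + 1) (r - min 1 r))
              = (1 + (j:Int) + 1) * q + min (1 + (j:Int) + 1) r := by
            have h2 : (1 + (j:Int) + 1) * q = ((j:Int) + 1) * q + q := by ring
            have hmm := hmin ((j:Int) + 1) (by omega)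
            rw [show (1:Int) + ((j:Int) + 1) = 1 + (j:Int) + 1 from by ring] at hmm
            linarith [hmm, h2]
          rw [e1, e2]

-- ===== VERDICT (by name: the statements are the Claim_ definitions above) =====
theorem split_into_parts_spec : Claim_equal_split_into_parts := by
  intro content n _ hn
  unfold Spec_split_into_parts
  by_cases hpos : 0 < n
  · unfold split_into_parts
    dsimp only
    have hr : 0 ≤ PySem.Int.mod (PySem.Str.len content) n := PySem.Int.mod_nonneg _ hpos
    have key := loop_closed_form content (PySem.Int.floordiv (PySem.Str.len content) n)
      (PySem.Int.mod (PySem.Str.len content) n) n.toNat 0 n (by omega) []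
    simp only [zero_mul, zero_add, min_eq_left hr, List.nil_append] at key
    rw [key]
    unfold split_into_parts_alt
    rw [alt_closed_form n.toNat [] content n rfl]
    simp
  · unfold split_into_parts split_into_parts_alt
    rw [splitPartsLoop, PySem.List.pyRange_one_eq_nil (by omega)]
    simp [show n ≤ 0 by omega]
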